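-- pv_equiv track=rewrite | github.com/avielmoshe/Introduction-to-Computer-Science | homework10.py | is_switched_number
-- ===== SOURCE A (Python) =====
-- def is_switched_number(number):
--     if number < 10:
--         return True
--
--     last_digit = number % 10
--     prev_digit = (number // 10) % 10
--
--     if (last_digit % 2) == (prev_digit % 2):
--         return False
--     return is_switched_number(number // 10)
-- ===== SOURCE B (Python) =====
-- def is_switched_number(number):
--     if number < 10:
--         return True
--     digits = []
--     n = number
--     while n > 0:
--         digits.append(n % 10)
--         n //= 10
--     return all((a + b) % 2 == 1 for a, b in zip(digits, digits[1:]))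
-- ===== Notes on version B (the rewrite author's own statement) =====
-- stated objective: alternative
-- what changed: Replaced the peel-one-digit recursion by a two-phase computation: build the digit list once with a loop, then check every adjacent pair at once with zip/all using the 'sum is odd' parity test.
import Mathlib
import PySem

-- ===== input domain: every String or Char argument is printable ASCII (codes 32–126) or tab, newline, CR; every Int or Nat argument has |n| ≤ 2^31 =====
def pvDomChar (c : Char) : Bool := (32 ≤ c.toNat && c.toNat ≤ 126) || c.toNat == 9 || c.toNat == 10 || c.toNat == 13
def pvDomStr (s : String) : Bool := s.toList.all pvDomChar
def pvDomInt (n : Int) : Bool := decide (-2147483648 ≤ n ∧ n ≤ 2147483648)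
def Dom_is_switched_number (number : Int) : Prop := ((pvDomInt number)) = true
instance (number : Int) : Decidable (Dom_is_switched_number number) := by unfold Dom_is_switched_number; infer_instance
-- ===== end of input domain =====

-- B replaces A's peel-one-digit recursion by: build the digit list once, then check every
-- adjacent pair with zip/all using the 'sum is odd' parity test (objective: alternative).

-- ===== PORT A =====
def is_switched_number (number : Int) : Bool :=
  if number < 10 then true
  else
    let last_digit := PySem.Int.mod number 10
    let prev_digit := PySem.Int.mod (PySem.Int.floordiv number 10) 10
    if PySem.Int.mod last_digit 2 == PySem.Int.mod prev_digit 2 then false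
    else is_switched_number (PySem.Int.floordiv number 10)
termination_by number.toNat
decreasing_by
  rw [PySem.Int.floordiv_eq_ediv_of_pos (by omega : (0:Int) < 10)]
  omega

-- ===== PORT B =====
-- the while loop of Source B: collect n % 10 and continue with n // 10 while n > 0
def pvDigitsB (n : Int) : List Int :=
  if 0 < n then PySem.Int.mod n 10 :: pvDigitsB (PySem.Int.floordiv n 10) else []
termination_by n.toNat
decreasing_by
  rw [PySem.Int.floordiv_eq_ediv_of_pos (by omega : (0:Int) < 10)]
  omega

def is_switched_number_alt (number : Int) : Bool :=
  if number < 10 then true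
  else
    let digits := pvDigitsB number
    -- digits[1:] is PySem.List.slice digits (some 1) none
    ((digits.zip (PySem.List.slice digits (some 1) none)).all fun p =>
      PySem.Int.mod (p.1 + p.2) 2 == 1)

-- ===== PRECONDITION & SPEC =====
def Spec_is_switched_number (number : Int) (out : Bool) : Prop := out = is_switched_number_alt number
instance (number : Int) (out : Bool) : Decidable (Spec_is_switched_number number out) := by unfold Spec_is_switched_number; infer_instance

-- ===== CLAIM (what is proved, stated in full; the proofs are below) =====
def Claim_equal_is_switched_number : Prop := ∀ (number : Int), Dom_is_switched_number number → Spec_is_switched_number number (is_switched_number number)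

-- ===== LEMMAS AND PROOFS =====

def pvPairAll (l : List Int) : Bool :=
  (l.zip l.tail).all fun p => PySem.Int.mod (p.1 + p.2) 2 == 1

theorem pvDigitsB_pos (n : Int) (h : 0 < n) :
    pvDigitsB n = PySem.Int.mod n 10 :: pvDigitsB (PySem.Int.floordiv n 10) := by
  rw [pvDigitsB]; simp [h]

theorem pvDigitsB_nonpos (n : Int) (h : ¬ 0 < n) : pvDigitsB n = [] := by
  rw [pvDigitsB]; simp [h]

theorem pv_key (n : Int) (hn : 0 < n) : is_switched_number n = pvPairAll (pvDigitsB n) := by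
  by_cases h10 : n < 10
  · rw [is_switched_number, if_pos h10, pvDigitsB_pos n hn]
    have : ¬ (0 : Int) < PySem.Int.floordiv n 10 := by
      rw [PySem.Int.floordiv_eq_ediv_of_pos (by omega : (0:Int) < 10)]; omega
    rw [pvDigitsB_nonpos _ this]
    simp [pvPairAll]
  · set m := PySem.Int.floordiv n 10 with hmdef
    have hme : m = n / 10 := PySem.Int.floordiv_eq_ediv_of_pos (by omega : (0:Int) < 10)
    have hm : 0 < m := by omega
    have hparity : (PySem.Int.mod (PySem.Int.mod n 10) 2 == PySem.Int.mod (PySem.Int.mod m 10) 2)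
        = ! (PySem.Int.mod (PySem.Int.mod n 10 + PySem.Int.mod m 10) 2 == 1) := by
      have e1 : PySem.Int.mod n 10 = n % 10 := PySem.Int.mod_eq_emod_of_pos (by omega)
      have e2 : PySem.Int.mod m 10 = m % 10 := PySem.Int.mod_eq_emod_of_pos (by omega)
      have e3 : ∀ x : Int, PySem.Int.mod x 2 = x % 2 := fun x => PySem.Int.mod_eq_emod_of_pos (by omega)
      rw [e1, e2, e3, e3, e3]
      rcases Bool.eq_false_or_eq_true (n % 10 % 2 == m % 10 % 2) with hb | hb <;> rw [hb]
      · have heq : n % 10 % 2 = m % 10 % 2 := by simpa using hb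
        have hev : (n % 10 + m % 10) % 2 ≠ 1 := by omega
        simp [hev]
      · have hne : ¬ (n % 10 % 2 = m % 10 % 2) := by simpa using hb
        have hodd : (n % 10 + m % 10) % 2 = 1 := by omega
        simp [hodd]
    have hrec := pv_key m hm
    rw [is_switched_number, if_neg h10, ← hmdef, hrec]
    simp only [pvPairAll]
    rw [pvDigitsB_pos n hn, pvDigitsB_pos m hm]
    simp only [List.tail_cons, List.zip_cons_cons, List.all_cons]
    rw [hparity]
    cases hY : (PySem.Int.mod (PySem.Int.mod n 10 + PySem.Int.mod m 10) 2 == 1) <;> simp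
termination_by n.toNat
decreasing_by omega

-- ===== VERDICT (by name: the statement is the Claim_ definition above) =====
theorem is_switched_number_spec : Claim_equal_is_switched_number := by
  intro n _
  unfold Spec_is_switched_number is_switched_number_alt
  by_cases h10 : n < 10
  · simp only [if_pos h10]
    rw [is_switched_number, if_pos h10]
  · simp only [if_neg h10]
    rw [PySem.List.slice_from_one]
    exact pv_key n (by omega)
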